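-- pv_equiv track=rewrite | github.com/rfael5/previsao_compras | formatacao_objeto.py | agruparLinhas
-- ===== SOURCE A (Python) =====
-- def agruparLinhas(produto):
--     if '\x00' in produto['linha']:
--         produto['linha'] = produto['linha'].replace('\x00', '')
--
--     for x in range(1, 5):
--         if produto['linha'] == f'S{x}' or produto['linha'] == 'S6':
--             return 'Sal'
--
--     for x in range(1, 7):
--         if produto['linha'] == f'M-{x}' or produto['linha'] == 'Doce Geral':
--             return 'Doces'
--
--     for x in range(1, 4):
--         if produto['linha'] == f'C-{x}':
--             return 'Confeitaria'
--
--     if produto['linha'] == 'S5':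
--         return 'Canapés'
--
--     if produto['linha'] == 'S7' or produto['linha'] == 'S8':
--         return 'Refeições'
-- ===== SOURCE B (Python) =====
-- def agruparLinhas(produto):
--     if '\x00' in produto['linha']:
--         produto['linha'] = produto['linha'].replace('\x00', '')
--     l = produto['linha']
--     if l == 'Doce Geral':
--         return 'Doces'
--     if len(l) == 2 and l[0] == 'S':
--         d = l[1]
--         if d in '12346':
--             return 'Sal'
--         if d == '5':
--             return 'Canapés'
--         if d in '78':
--             return 'Refeições'
--     elif len(l) == 3 and l[1] == '-':
--         d = l[2]
--         if l[0] == 'M' and d in '123456':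
--             return 'Doces'
--         if l[0] == 'C' and d in '123':
--             return 'Confeitaria'
--     return None
-- ===== Notes on version B (the rewrite author's own statement) =====
-- stated objective: alternative
-- what changed: Instead of scanning enumerated candidate keys, B parses the code's structure: it checks the string's length, letter prefix and digit/separator positions and classifies from those fields ('S'+digit by digit range, letter+'-'+digit by letter and digit range, plus the one literal 'Doce Geral').
import Mathlib
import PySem

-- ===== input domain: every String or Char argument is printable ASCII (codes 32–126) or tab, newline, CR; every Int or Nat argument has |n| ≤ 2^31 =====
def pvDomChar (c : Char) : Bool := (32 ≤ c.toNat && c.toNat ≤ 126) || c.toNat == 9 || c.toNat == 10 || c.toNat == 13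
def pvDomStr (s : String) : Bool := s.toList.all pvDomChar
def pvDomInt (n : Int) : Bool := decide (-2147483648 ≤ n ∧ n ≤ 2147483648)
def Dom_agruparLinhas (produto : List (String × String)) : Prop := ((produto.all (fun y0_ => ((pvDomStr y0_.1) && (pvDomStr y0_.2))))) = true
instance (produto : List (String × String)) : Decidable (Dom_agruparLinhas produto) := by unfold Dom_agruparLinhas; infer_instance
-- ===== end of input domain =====

-- B replaces A's three loop-and-compare scans over enumerated keys by a structural parse of
-- the code (length / prefix letter / separator / digit-range tests); objective: alternative.
-- Both versions mutate produto['linha'] in place (null-byte strip); the equivalence proved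
-- is about the RETURN value only.

-- Python dict lookup produto['linha'] on the association list (first match; exact for a
-- Python dict, whose keys are unique).
def pvDictGet? (d : List (String × String)) (k : String) : Option String :=
  match d with
  | [] => none
  | (k', v) :: rest => if k == k' then some v else pvDictGet? rest k

-- ===== PORT A =====
-- for x in range(1, 5): if linha == f'S{x}' or linha == 'S6': return 'Sal'
def pvLoopSal (l : String) : List Int → Option String
  | [] => none
  | x :: xs =>
    if l == "S" ++ PySem.Int.toStr x || l == "S6" then some "Sal" else pvLoopSal l xs

-- for x in range(1, 7): if linha == f'M-{x}' or linha == 'Doce Geral': return 'Doces'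
def pvLoopDoces (l : String) : List Int → Option String
  | [] => none
  | x :: xs =>
    if l == "M-" ++ PySem.Int.toStr x || l == "Doce Geral" then some "Doces" else pvLoopDoces l xs

-- for x in range(1, 4): if linha == f'C-{x}': return 'Confeitaria'
def pvLoopConf (l : String) : List Int → Option String
  | [] => none
  | x :: xs =>
    if l == "C-" ++ PySem.Int.toStr x then some "Confeitaria" else pvLoopConf l xs

def agruparLinhas (produto : List (String × String)) : Option String :=
  match pvDictGet? produto "linha" with
  | none => none  -- KeyError in Python; excluded by Pre_agruparLinhas
  | some l0 =>
    -- if '\x00' in produto['linha']: produto['linha'] = produto['linha'].replace('\x00','')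
    let l := if PySem.Str.isIn "\x00" l0 then PySem.Str.replace l0 "\x00" "" else l0
    match pvLoopSal l (PySem.List.pyRange 1 5 1) with
    | some r => some r
    | none =>
      match pvLoopDoces l (PySem.List.pyRange 1 7 1) with
      | some r => some r
      | none =>
        match pvLoopConf l (PySem.List.pyRange 1 4 1) with
        | some r => some r
        | none =>
          if l == "S5" then some "Canapés"
          else if l == "S7" || l == "S8" then some "Refeições"
          else none

-- ===== PORT B =====
-- the length-2 / length-3 structural branches of Source B, over the code's character list
-- (len(l)==2 ↔ the two-element pattern, l[i] ↔ the pattern variables, `d in '…'` ↔ membership)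
def pvClassify : List Char → Option String
  | [c0, c1] =>
    if c0 = 'S' then
      if c1 ∈ ['1', '2', '3', '4', '6'] then some "Sal"
      else if c1 = '5' then some "Canapés"
      else if c1 ∈ ['7', '8'] then some "Refeições"
      else none
    else none
  | [c0, c1, c2] =>
    if c1 = '-' then
      if c0 = 'M' ∧ c2 ∈ ['1', '2', '3', '4', '5', '6'] then some "Doces"
      else if c0 = 'C' ∧ c2 ∈ ['1', '2', '3'] then some "Confeitaria"
      else none
    else none
  | _ => none

def agruparLinhas_alt (produto : List (String × String)) : Option String :=
  match pvDictGet? produto "linha" with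
  | none => none  -- KeyError in Python; excluded by Pre_agruparLinhas
  | some l0 =>
    let l := if PySem.Str.isIn "\x00" l0 then PySem.Str.replace l0 "\x00" "" else l0
    if l == "Doce Geral" then some "Doces" else pvClassify l.toList

-- ===== PRECONDITION & SPEC =====
-- Pre_ excludes exactly the dicts without a 'linha' key, on which Python A raises KeyError.
def Pre_agruparLinhas (produto : List (String × String)) : Prop :=
  (produto.any (fun p => p.1 == "linha")) = true
instance (produto : List (String × String)) : Decidable (Pre_agruparLinhas produto) := by
  unfold Pre_agruparLinhas; infer_instance

def pvWitness_agruparLinhas : (List (String × String)) := [("linha", "S1")]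

def Spec_agruparLinhas (produto : List (String × String)) (out : Option String) : Prop := out = agruparLinhas_alt produto
instance (produto : List (String × String)) (out : Option String) : Decidable (Spec_agruparLinhas produto out) := by unfold Spec_agruparLinhas; infer_instance

-- ===== CLAIM (what is proved, stated in full; the proofs are below) =====
def Claim_equal_agruparLinhas : Prop := ∀ (produto : List (String × String)), Dom_agruparLinhas produto → Pre_agruparLinhas produto → Spec_agruparLinhas produto (agruparLinhas produto)

-- ===== LEMMAS AND PROOFS =====

-- B's parser only accepts the 18 concrete codes; off every one of them it yields none.
theorem pvClassify_none (l : String)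
    (h1 : l ≠ "S1") (h2 : l ≠ "S2") (h3 : l ≠ "S3") (h4 : l ≠ "S4")
    (h5 : l ≠ "S5") (h6 : l ≠ "S6") (h7 : l ≠ "S7") (h8 : l ≠ "S8")
    (m1 : l ≠ "M-1") (m2 : l ≠ "M-2") (m3 : l ≠ "M-3") (m4 : l ≠ "M-4")
    (m5 : l ≠ "M-5") (m6 : l ≠ "M-6")
    (c1 : l ≠ "C-1") (c2 : l ≠ "C-2") (c3 : l ≠ "C-3") :
    pvClassify l.toList = none := by
  have hl : ∀ s : String, l.toList = s.toList → l = s := fun s h => String.toList_inj.mp h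
  rcases hL : l.toList with _ | ⟨c0, _ | ⟨c1, _ | ⟨c2, _ | rest⟩⟩⟩
  · simp [pvClassify]
  · simp [pvClassify]
  · -- len 2: only the 'S'+digit branch can fire, and each firing digit names an excluded key
    simp only [pvClassify]
    split_ifs with hS hA hB hC
    · subst hS
      simp only [List.mem_cons, List.not_mem_nil, or_false] at hA
      rcases hA with h | h | h | h | h <;> subst h
      · exact absurd (hl "S1" (by rw [hL]; decide)) h1
      · exact absurd (hl "S2" (by rw [hL]; decide)) h2
      · exact absurd (hl "S3" (by rw [hL]; decide)) h3
      · exact absurd (hl "S4" (by rw [hL]; decide)) h4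
      · exact absurd (hl "S6" (by rw [hL]; decide)) h6
    · subst hS; subst hB
      exact absurd (hl "S5" (by rw [hL]; decide)) h5
    · subst hS
      simp only [List.mem_cons, List.not_mem_nil, or_false] at hC
      rcases hC with h | h <;> subst h
      · exact absurd (hl "S7" (by rw [hL]; decide)) h7
      · exact absurd (hl "S8" (by rw [hL]; decide)) h8
    · rfl
    · rfl
  · -- len 3: only the letter+'-'+digit branches can fire
    simp only [pvClassify]
    split_ifs with hD hM hC
    · obtain ⟨hM0, hMd⟩ := hM
      subst hD; subst hM0
      simp only [List.mem_cons, List.not_mem_nil, or_false] at hMd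
      rcases hMd with h | h | h | h | h | h <;> subst h
      · exact absurd (hl "M-1" (by rw [hL]; decide)) m1
      · exact absurd (hl "M-2" (by rw [hL]; decide)) m2
      · exact absurd (hl "M-3" (by rw [hL]; decide)) m3
      · exact absurd (hl "M-4" (by rw [hL]; decide)) m4
      · exact absurd (hl "M-5" (by rw [hL]; decide)) m5
      · exact absurd (hl "M-6" (by rw [hL]; decide)) m6
    · obtain ⟨hC0, hCd⟩ := hC
      subst hD; subst hC0
      simp only [List.mem_cons, List.not_mem_nil, or_false] at hCd
      rcases hCd with h | h | h <;> subst h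
      · exact absurd (hl "C-1" (by rw [hL]; decide)) c1
      · exact absurd (hl "C-2" (by rw [hL]; decide)) c2
      · exact absurd (hl "C-3" (by rw [hL]; decide)) c3
    · rfl
    · rfl
  · simp [pvClassify]

-- core equivalence: for ANY string l (post-strip), A's scan chain equals B's structural parse
set_option maxHeartbeats 1600000 in
theorem pvCore_eq (l : String) :
    (match pvLoopSal l (PySem.List.pyRange 1 5 1) with
     | some r => some r
     | none =>
       match pvLoopDoces l (PySem.List.pyRange 1 7 1) with
       | some r => some r
       | none =>
         match pvLoopConf l (PySem.List.pyRange 1 4 1) with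
         | some r => some r
         | none =>
           if l == "S5" then some "Canapés"
           else if l == "S7" || l == "S8" then some "Refeições"
           else none) =
    (if l == "Doce Geral" then some "Doces" else pvClassify l.toList) := by
  by_cases hk0 : l = "S1"
  · subst hk0; decide
  by_cases hk1 : l = "S2"
  · subst hk1; decide
  by_cases hk2 : l = "S3"
  · subst hk2; decide
  by_cases hk3 : l = "S4"
  · subst hk3; decide
  by_cases hk4 : l = "S6"
  · subst hk4; decide
  by_cases hk5 : l = "M-1"
  · subst hk5; decide
  by_cases hk6 : l = "M-2"
  · subst hk6; decide
  by_cases hk7 : l = "M-3"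
  · subst hk7; decide
  by_cases hk8 : l = "M-4"
  · subst hk8; decide
  by_cases hk9 : l = "M-5"
  · subst hk9; decide
  by_cases hk10 : l = "M-6"
  · subst hk10; decide
  by_cases hk11 : l = "Doce Geral"
  · subst hk11; decide
  by_cases hk12 : l = "C-1"
  · subst hk12; decide
  by_cases hk13 : l = "C-2"
  · subst hk13; decide
  by_cases hk14 : l = "C-3"
  · subst hk14; decide
  by_cases hk15 : l = "S5"
  · subst hk15; decide
  by_cases hk16 : l = "S7"
  · subst hk16; decide
  by_cases hk17 : l = "S8"
  · subst hk17; decide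
  rw [pvClassify_none l hk0 hk1 hk2 hk3 hk15 hk4 hk16 hk17 hk5 hk6 hk7 hk8 hk9 hk10
       hk12 hk13 hk14]
  have h5 : PySem.List.pyRange 1 5 1 = [1, 2, 3, 4] := by decide
  have h7 : PySem.List.pyRange 1 7 1 = [1, 2, 3, 4, 5, 6] := by decide
  have h4 : PySem.List.pyRange 1 4 1 = [1, 2, 3] := by decide
  rw [h5, h7, h4]
  simp only [pvLoopSal, pvLoopDoces, pvLoopConf,
    show PySem.Int.toStr 1 = "1" from by decide, show PySem.Int.toStr 2 = "2" from by decide,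
    show PySem.Int.toStr 3 = "3" from by decide, show PySem.Int.toStr 4 = "4" from by decide,
    show PySem.Int.toStr 5 = "5" from by decide, show PySem.Int.toStr 6 = "6" from by decide,
    show "S" ++ "1" = "S1" from rfl, show "S" ++ "2" = "S2" from rfl,
    show "S" ++ "3" = "S3" from rfl, show "S" ++ "4" = "S4" from rfl,
    show "M-" ++ "1" = "M-1" from rfl, show "M-" ++ "2" = "M-2" from rfl,
    show "M-" ++ "3" = "M-3" from rfl, show "M-" ++ "4" = "M-4" from rfl,
    show "M-" ++ "5" = "M-5" from rfl, show "M-" ++ "6" = "M-6" from rfl,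
    show "C-" ++ "1" = "C-1" from rfl, show "C-" ++ "2" = "C-2" from rfl,
    show "C-" ++ "3" = "C-3" from rfl, beq_iff_eq, Bool.or_eq_true]
  simp [hk0, hk1, hk2, hk3, hk4, hk5, hk6, hk7, hk8, hk9, hk10, hk11, hk12, hk13, hk14, hk15, hk16, hk17]

-- ===== VERDICT (by name: the statement is the Claim_ definition above) =====
theorem agruparLinhas_spec : Claim_equal_agruparLinhas := by
  intro produto _ _
  unfold Spec_agruparLinhas agruparLinhas agruparLinhas_alt
  cases pvDictGet? produto "linha" with
  | none => rfl
  | some l0 => exact pvCore_eq _
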